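-- pv_equiv track=rewrite | github.com/cadaritre/Lapis-monetae | tools/xmrig-lmt/gui/app.py | _cashaddr_polymod
-- ===== SOURCE A (Python) =====
-- _GENERATORS = (0x98f2bc8e61, 0x79b76d99e2, 0xf33e5fb3c4, 0xae2eabe2a8, 0x1e4f43e470)
--
-- def _cashaddr_polymod(values: list[int]) -> int:
--     c = 1
--     for d in values:
--         c0 = c >> 35
--         c = ((c & 0x07_FFFF_FFFF) << 5) ^ d
--         for i in range(5):
--             if c0 & (1 << i):
--                 c ^= _GENERATORS[i]
--     return c ^ 1
-- ===== SOURCE B (Python) =====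
-- _GENERATORS = (0x98f2bc8e61, 0x79b76d99e2, 0xf33e5fb3c4, 0xae2eabe2a8, 0x1e4f43e470)
--
-- # 32-entry table: _MASK[k] = XOR of _GENERATORS[i] over the bits i set in k,
-- # so the per-step inner bit-test loop collapses to one table lookup.
-- _MASK = []
-- for _k in range(32):
--     _m = 0
--     for _i in range(5):
--         if _k & (1 << _i):
--             _m ^= _GENERATORS[_i]
--     _MASK.append(_m)
--
--
-- def _cashaddr_polymod(values: list[int]) -> int:
--     c = 1
--     for d in values:
--         c0 = c >> 35
--         c = (((c & 0x07_FFFF_FFFF) << 5) ^ d) ^ _MASK[c0 & 31]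
--     return c ^ 1
-- ===== Notes on version B (the rewrite author's own statement) =====
-- stated objective: faster
-- what changed: The inner bit-testing loop over the 5 generators is replaced by a single lookup into a 32-entry XOR table precomputed from the generators at module load, so each step of the outer loop does one table XOR instead of five conditional XORs.
import Mathlib
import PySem

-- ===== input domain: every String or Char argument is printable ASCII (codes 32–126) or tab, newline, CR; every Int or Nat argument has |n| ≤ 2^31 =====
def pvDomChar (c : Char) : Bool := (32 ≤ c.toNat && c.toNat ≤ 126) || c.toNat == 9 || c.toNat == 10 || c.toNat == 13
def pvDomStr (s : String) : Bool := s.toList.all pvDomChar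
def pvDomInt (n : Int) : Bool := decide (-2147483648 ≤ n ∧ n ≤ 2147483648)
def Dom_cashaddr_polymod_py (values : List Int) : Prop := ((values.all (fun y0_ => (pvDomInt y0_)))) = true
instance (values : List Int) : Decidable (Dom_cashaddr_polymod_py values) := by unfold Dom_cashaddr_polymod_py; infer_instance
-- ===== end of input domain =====

-- B replaces the inner 5-step bit-test loop of A by one lookup in a precomputed
-- 32-entry XOR table (alternative decomposition; return value only, no mutation).

-- ===== PORT A =====
-- _GENERATORS tuple
def pvGenerators : List Int :=
  [0x98f2bc8e61, 0x79b76d99e2, 0xf33e5fb3c4, 0xae2eabe2a8, 0x1e4f43e470]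

-- body of A's inner loop: 'if c0 & (1 << i): c ^= _GENERATORS[i]'
-- (index i is always < 5 here, so getD with default 0 is exact)
def innerF (c0 : Int) (c : Int) (i : Nat) : Int :=
  if PySem.Int.band c0 ((1 : Int) <<< i) ≠ 0 then PySem.Int.bxor c (pvGenerators.getD i 0) else c

def cashaddr_polymod_py (values : List Int) : Int :=
  let c := values.foldl (fun (c d : Int) =>
      let c0 := c >>> (35 : Nat)
      let c1 := PySem.Int.bxor ((PySem.Int.band c 0x07FFFFFFFF) <<< (5 : Nat)) d
      (List.range 5).foldl (innerF c0) c1) 1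
  PySem.Int.bxor c 1

-- ===== PORT B =====
-- _MASK table builder of Source B: for k in range(32): xor of generators on the set bits of k
def pvMaskEntry (k : Nat) : Int :=
  (List.range 5).foldl
    (fun m i => if k &&& (1 <<< i) ≠ 0 then PySem.Int.bxor m (pvGenerators.getD i 0) else m) 0

def pvMask : List Int :=
  (List.range 32).foldl (fun acc k => acc ++ [pvMaskEntry k]) []

-- _MASK[c0 & 31]: the index is always in [0,32) = range of the table, so getD 0 is exact
def cashaddr_polymod_py_alt (values : List Int) : Int :=
  let c := values.foldl (fun (c d : Int) =>
      let c0 := c >>> (35 : Nat)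
      PySem.Int.bxor (PySem.Int.bxor ((PySem.Int.band c 0x07FFFFFFFF) <<< (5 : Nat)) d)
        (pvMask.getD (PySem.Int.band c0 31).toNat 0)) 1
  PySem.Int.bxor c 1

-- ===== PRECONDITION & SPEC =====
def Spec_cashaddr_polymod_py (values : List Int) (out : Int) : Prop := out = cashaddr_polymod_py_alt values
instance (values : List Int) (out : Int) : Decidable (Spec_cashaddr_polymod_py values out) := by unfold Spec_cashaddr_polymod_py; infer_instance

-- ===== CLAIM (what is proved, stated in full; the proofs are below) =====
def Claim_equal_cashaddr_polymod_py : Prop := ∀ (values : List Int), Dom_cashaddr_polymod_py values → Spec_cashaddr_polymod_py values (cashaddr_polymod_py values)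

-- ===== LEMMAS AND PROOFS =====

-- xor is associative when the two right operands are nonnegative
theorem bxor_bxor_nonneg (a x y : Int) (hx : 0 ≤ x) (hy : 0 ≤ y) :
    PySem.Int.bxor (PySem.Int.bxor a x) y = PySem.Int.bxor a (PySem.Int.bxor x y) := by
  by_cases ha : 0 ≤ a
  · simp only [PySem.Int.bxor, if_pos ha, if_pos hx, if_pos hy,
      if_pos (Int.natCast_nonneg _)]
    rw [Int.toNat_natCast, Int.toNat_natCast, Nat.xor_assoc]
  · have h1 : PySem.Int.bxor a x = -↑((-a - 1).toNat ^^^ x.toNat) - 1 := by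
      simp only [PySem.Int.bxor, if_neg ha, if_pos hx]
    have h2 : PySem.Int.bxor x y = ((x.toNat ^^^ y.toNat : Nat) : Int) := by
      simp only [PySem.Int.bxor, if_pos hx, if_pos hy]
    rw [h1, h2]
    have hneg : ¬ (0 ≤ -(((-a - 1).toNat ^^^ x.toNat : Nat) : Int) - 1) := by
      have := Int.natCast_nonneg ((-a - 1).toNat ^^^ x.toNat)
      omega
    simp only [PySem.Int.bxor, if_neg hneg, if_pos hy, if_neg ha,
      if_pos (Int.natCast_nonneg (x.toNat ^^^ y.toNat))]
    have he : (-(-(((-a - 1).toNat ^^^ x.toNat : Nat) : Int) - 1) - 1).toNat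
        = (-a - 1).toNat ^^^ x.toNat := by omega
    rw [he, Int.toNat_natCast, Nat.xor_assoc]

theorem band31_bounds (a : Int) : 0 ≤ PySem.Int.band a 31 ∧ PySem.Int.band a 31 < 32 := by
  unfold PySem.Int.band
  split_ifs with h1 h2 h2
  · have h : a.toNat &&& (31 : Int).toNat ≤ 31 := Nat.and_le_right
    omega
  · omega
  · have h : (31 : Int).toNat - ((31 : Int).toNat &&& (-a - 1).toNat) ≤ 31 := by
      have := @Nat.and_le_left ((31 : Int).toNat) ((-a - 1).toNat)
      omega
    omega
  · omega

-- the low five bits of a are those of a & 31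
theorem band_band31 (a g : Int) (hg : g = 1 ∨ g = 2 ∨ g = 4 ∨ g = 8 ∨ g = 16) :
    PySem.Int.band a g = PySem.Int.band (PySem.Int.band a 31) g := by
  have hgn : 0 ≤ g := by rcases hg with h|h|h|h|h <;> omega
  by_cases ha : 0 ≤ a
  · have h31 : PySem.Int.band a 31 = ((a.toNat &&& 31 : Nat) : Int) := by
      simp only [PySem.Int.band, if_pos ha, show ((31:Int)).toNat = 31 from rfl]
      norm_num
    rw [h31]
    simp only [PySem.Int.band, if_pos ha, if_pos hgn, if_pos (Int.natCast_nonneg _)]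
    rw [Int.toNat_natCast, Nat.and_assoc]
    rcases hg with h|h|h|h|h <;> subst h <;> congr 1 <;> decide
  · have h31 : PySem.Int.band a 31 = ((31 - (31 &&& (-a - 1).toNat) : Nat) : Int) := by
      simp only [PySem.Int.band, if_neg ha, show ((31:Int)).toNat = 31 from rfl]
      norm_num
    rw [h31]
    simp only [PySem.Int.band, if_neg ha, if_pos hgn, if_pos (Int.natCast_nonneg _)]
    rw [Int.toNat_natCast]
    have hk : (31 : Nat) &&& (-a - 1).toNat ≤ 31 := Nat.and_le_left
    have hgm : g.toNat &&& (-a - 1).toNat = g.toNat &&& ((31 : Nat) &&& (-a - 1).toNat) := by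
      conv_lhs => rw [show g.toNat = g.toNat &&& 31 by
        rcases hg with h|h|h|h|h <;> subst h <;> decide]
      rw [Nat.and_assoc]
    rw [hgm]
    generalize (31 : Nat) &&& (-a - 1).toNat = k at hk ⊢
    interval_cases k <;> rcases hg with h|h|h|h|h <;> subst h <;> decide

theorem gen_nonneg (i : Nat) : 0 ≤ pvGenerators.getD i 0 := by
  rcases i with _|_|_|_|_|i <;> simp [pvGenerators, List.getD]

theorem innerF_nonneg (c0 : Int) (l : List Nat) (c : Int) (hc : 0 ≤ c) :
    0 ≤ l.foldl (innerF c0) c := by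
  induction l generalizing c with
  | nil => simpa using hc
  | cons i l ih =>
    apply ih
    unfold innerF
    split_ifs with h
    · rw [PySem.Int.bxor_of_nonneg hc (gen_nonneg i)]
      exact Int.natCast_nonneg _
    · exact hc

theorem innerF_pull (c0 : Int) (l : List Nat) (c : Int) :
    l.foldl (innerF c0) c = PySem.Int.bxor c (l.foldl (innerF c0) 0) := by
  induction l generalizing c with
  | nil => simp [PySem.Int.bxor_zero]
  | cons i l ih =>
    rw [List.foldl_cons, List.foldl_cons, ih (innerF c0 c i), ih (innerF c0 0 i)]
    have hF : 0 ≤ l.foldl (innerF c0) 0 := innerF_nonneg c0 l 0 le_rfl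
    by_cases h : PySem.Int.band c0 ((1 : Int) <<< i) ≠ 0
    · rw [show innerF c0 c i = PySem.Int.bxor c (pvGenerators.getD i 0) by
          unfold innerF; rw [if_pos h],
        show innerF c0 0 i = pvGenerators.getD i 0 by
          unfold innerF; rw [if_pos h, PySem.Int.bxor_comm, PySem.Int.bxor_zero]]
      exact bxor_bxor_nonneg c _ _ (gen_nonneg i) hF
    · rw [show innerF c0 c i = c by unfold innerF; rw [if_neg h],
        show innerF c0 0 i = 0 by unfold innerF; rw [if_neg h],
        PySem.Int.bxor_comm 0, PySem.Int.bxor_zero]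

theorem inner_eq (c0 c1 : Int) :
    (List.range 5).foldl (innerF c0) c1
      = PySem.Int.bxor c1 (pvMask.getD (PySem.Int.band c0 31).toNat 0) := by
  rw [innerF_pull]
  congr 1
  have h0 := band_band31 c0 1 (Or.inl rfl)
  have h1 := band_band31 c0 2 (Or.inr (Or.inl rfl))
  have h2 := band_band31 c0 4 (Or.inr (Or.inr (Or.inl rfl)))
  have h3 := band_band31 c0 8 (Or.inr (Or.inr (Or.inr (Or.inl rfl))))
  have h4 := band_band31 c0 16 (Or.inr (Or.inr (Or.inr (Or.inr rfl))))
  obtain ⟨hlo, hhi⟩ := band31_bounds c0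
  simp only [show List.range 5 = [0, 1, 2, 3, 4] from rfl, List.foldl_cons, List.foldl_nil,
    innerF, show ((1 : Int) <<< (0 : Nat)) = 1 from rfl, show ((1 : Int) <<< (1 : Nat)) = 2 from rfl,
    show ((1 : Int) <<< (2 : Nat)) = 4 from rfl, show ((1 : Int) <<< (3 : Nat)) = 8 from rfl,
    show ((1 : Int) <<< (4 : Nat)) = 16 from rfl]
  rw [h0, h1, h2, h3, h4]
  generalize PySem.Int.band c0 31 = m at hlo hhi ⊢
  interval_cases m <;> decide

-- ===== VERDICT (by name: the statement is the Claim_ definition above) =====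
theorem cashaddr_polymod_py_spec : Claim_equal_cashaddr_polymod_py := by
  intro values _
  unfold Spec_cashaddr_polymod_py cashaddr_polymod_py cashaddr_polymod_py_alt
  have hf : (fun (c d : Int) =>
      let c0 := c >>> (35 : Nat)
      let c1 := PySem.Int.bxor ((PySem.Int.band c 0x07FFFFFFFF) <<< (5 : Nat)) d
      (List.range 5).foldl (innerF c0) c1)
    = (fun (c d : Int) =>
      let c0 := c >>> (35 : Nat)
      PySem.Int.bxor (PySem.Int.bxor ((PySem.Int.band c 0x07FFFFFFFF) <<< (5 : Nat)) d)
        (pvMask.getD (PySem.Int.band c0 31).toNat 0)) :=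
    funext fun c => funext fun d => inner_eq _ _
  rw [hf]
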